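-- pv_equiv track=rewrite | github.com/Aryudesu/ABC | ABC/300_399/386/D.py | calc
-- ===== SOURCE A (Python) =====
-- def calc(N, data, Y):
--     # とっていないといけないBの最大値
--     bMax = 0
--     # 右から見ていく
--     for y in Y:
--         yData = data.get(y, dict())
--         # 次にとらないといけないBとWの最大値
--         bTmp = yData.get("B")
--         wTmp = yData.get("W")
--         if not wTmp is None:
--             if wTmp <= bMax:
--                 return False
--         if not bTmp is None and not wTmp is None:
--             if bTmp > wTmp:
--                 return False
--         if not bTmp is None:
--             bMax = max([bMax, bTmp])
--     return True
-- ===== SOURCE B (Python) =====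
-- def calc(N, data, Y):
--     # Two passes: build the (B, W) table and the exclusive running-max-of-B
--     # prefix table, then verify every row with all().
--     pairs = [(data.get(y, {}).get("B"), data.get(y, {}).get("W")) for y in Y]
--     pm = []
--     m = 0
--     for b, _ in pairs:
--         pm.append(m)
--         if b is not None:
--             m = max(m, b)
--     return all(not (w is not None and (w <= p or (b is not None and b > w)))
--                for (b, w), p in zip(pairs, pm))
-- ===== Notes on version B (the rewrite author's own statement) =====
-- stated objective: alternative
-- what changed: Replaced the fused early-return scan carrying a running max with two separate passes: first build a (B,W) table plus an exclusive prefix-max-of-B table, then verify all rows with a single all() over the zipped tables.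
import Mathlib
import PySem

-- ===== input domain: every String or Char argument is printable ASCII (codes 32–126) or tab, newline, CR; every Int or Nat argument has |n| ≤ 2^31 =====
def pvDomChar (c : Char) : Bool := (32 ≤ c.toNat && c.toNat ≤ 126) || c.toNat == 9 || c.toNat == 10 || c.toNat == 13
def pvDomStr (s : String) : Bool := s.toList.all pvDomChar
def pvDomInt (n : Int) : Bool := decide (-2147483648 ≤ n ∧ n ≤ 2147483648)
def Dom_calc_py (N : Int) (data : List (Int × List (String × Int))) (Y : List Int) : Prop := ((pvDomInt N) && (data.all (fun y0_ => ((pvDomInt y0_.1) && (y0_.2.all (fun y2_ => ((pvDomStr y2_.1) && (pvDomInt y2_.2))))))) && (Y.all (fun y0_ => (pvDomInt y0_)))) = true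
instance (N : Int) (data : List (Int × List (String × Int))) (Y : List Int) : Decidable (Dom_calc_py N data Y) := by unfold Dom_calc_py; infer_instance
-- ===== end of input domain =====

-- B replaces A's fused early-return scan by two passes (build the (B,W) and
-- exclusive prefix-max tables, then check all rows); alternative, same cost.

-- ===== PORT A =====
-- A's loop over Y carrying the running bMax, with early returns.
def calcA_loop (data : List (Int × List (String × Int))) (Y : List Int) (bMax : Int) : Bool :=
  match Y with
  | [] => true
  | y :: rest =>
    let yData := (PySem.Dict.mk data).getD y []
    let bTmp := (PySem.Dict.mk yData).get? "B"
    let wTmp := (PySem.Dict.mk yData).get? "W"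
    if (match wTmp with | some w => decide (w ≤ bMax) | none => false) then false
    else if (match bTmp, wTmp with | some b, some w => decide (b > w) | _, _ => false) then false
    else calcA_loop data rest (match bTmp with | some b => max bMax b | none => bMax)

def calc_py (N : Int) (data : List (Int × List (String × Int))) (Y : List Int) : Bool :=
  calcA_loop data Y 0

-- ===== PORT B =====
-- the (bTmp, wTmp) table
def altPairs (data : List (Int × List (String × Int))) (Y : List Int) : List (Option Int × Option Int) :=
  Y.map (fun y =>
    ((PySem.Dict.mk ((PySem.Dict.mk data).getD y [])).get? "B",
     (PySem.Dict.mk ((PySem.Dict.mk data).getD y [])).get? "W"))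

-- the exclusive prefix-max-of-B table (second pass of Source B)
def altPrefix (ps : List (Option Int × Option Int)) (m : Int) : List Int :=
  match ps with
  | [] => []
  | (b, _) :: rest => m :: altPrefix rest (match b with | some bv => max m bv | none => m)

-- one row of the all() check of Source B
def altRowOk (q : (Option Int × Option Int) × Int) : Bool :=
  !(match q.1.2 with
    | none => false
    | some w => decide (w ≤ q.2) ||
        (match q.1.1 with | some b => decide (b > w) | none => false))

def calc_py_alt (N : Int) (data : List (Int × List (String × Int))) (Y : List Int) : Bool :=
  let pairs := altPairs data Y
  ((pairs.zip (altPrefix pairs 0)).all altRowOk)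

-- ===== PRECONDITION & SPEC =====
def Spec_calc_py (N : Int) (data : List (Int × List (String × Int))) (Y : List Int) (out : Bool) : Prop := out = calc_py_alt N data Y
instance (N : Int) (data : List (Int × List (String × Int))) (Y : List Int) (out : Bool) : Decidable (Spec_calc_py N data Y out) := by unfold Spec_calc_py; infer_instance

-- ===== CLAIM (what is proved, stated in full; the proofs are below) =====
def Claim_equal_calc_py : Prop := ∀ (N : Int) (data : List (Int × List (String × Int))) (Y : List Int), Dom_calc_py N data Y → Spec_calc_py N data Y (calc_py N data Y)

-- ===== LEMMAS AND PROOFS =====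
theorem calcA_loop_eq (data : List (Int × List (String × Int))) (Y : List Int) (m : Int) :
    calcA_loop data Y m
      = ((altPairs data Y).zip (altPrefix (altPairs data Y) m)).all altRowOk := by
  induction Y generalizing m with
  | nil => simp [calcA_loop, altPairs]
  | cons y rest ih =>
    simp only [calcA_loop, altPairs, List.map_cons, altPrefix, List.zip_cons_cons, List.all_cons]
    set bTmp := (PySem.Dict.mk ((PySem.Dict.mk data).getD y [])).get? "B" with hb
    set wTmp := (PySem.Dict.mk ((PySem.Dict.mk data).getD y [])).get? "W" with hw
    cases wTmp with
    | none =>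
      cases bTmp with
      | none => simpa [altRowOk, altPairs] using ih _
      | some b => simpa [altRowOk, altPairs] using ih _
    | some w =>
      by_cases h1 : w ≤ m
      · simp [altRowOk, h1]
      · cases bTmp with
        | none => simpa [altRowOk, h1, altPairs] using ih _
        | some b =>
          by_cases h2 : b > w
          · simp [altRowOk, h1, h2]
          · simpa [altRowOk, h1, h2, altPairs] using ih _

-- ===== VERDICT (by name: the statement is the Claim_ definition above) =====
theorem calc_py_spec : Claim_equal_calc_py := by
  intro N data Y _
  unfold Spec_calc_py calc_py calc_py_alt
  exact calcA_loop_eq data Y 0
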